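-- pv_equiv track=rewrite | github.com/bnomis/aoc-2024 | src/aoc/days/day04/run.py | point_to_neighbours
-- ===== SOURCE A (Python) =====
-- def grid_to_width_height(grid: list[list[str]]) -> tuple[int, int]:
--     return len(grid[0]), len(grid)
--
-- def point_to_neighbours(grid: list[list[str]], point: list[int]) -> list[list[int]]:
--     grid_width, grid_height = grid_to_width_height(grid)
--     max_x = grid_width - 1
--     max_y = grid_height - 1
--     start_x = point[0]
--     start_y = point[1]
--     possible = []
--     for y in range(-1, 2):
--         for x in range(-1, 2):
--             if x == 0 and y == 0:
--                 continue
--             new_x = start_x + x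
--             new_y = start_y + y
--             if new_x < 0 or new_x > max_x:
--                 continue
--             if new_y < 0 or new_y > max_y:
--                 continue
--             possible.append([new_x, new_y])
--     return possible
-- ===== SOURCE B (Python) =====
-- def point_to_neighbours(grid: list[list[str]], point: list[int]) -> list[list[int]]:
--     x, y = point[0], point[1]
--     width = len(grid[0])
--     return [
--         [xx, yy]
--         for yy in range(len(grid))
--         for xx in range(width)
--         if max(abs(xx - x), abs(yy - y)) == 1
--     ]
-- ===== Notes on version B (the rewrite author's own statement) =====
-- stated objective: alternative
-- what changed: B scans the whole grid in row-major order and keeps exactly the cells at Chebyshev distance 1 from the point, instead of enumerating the 8 offset candidates with per-candidate bound checks.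
import Mathlib
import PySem

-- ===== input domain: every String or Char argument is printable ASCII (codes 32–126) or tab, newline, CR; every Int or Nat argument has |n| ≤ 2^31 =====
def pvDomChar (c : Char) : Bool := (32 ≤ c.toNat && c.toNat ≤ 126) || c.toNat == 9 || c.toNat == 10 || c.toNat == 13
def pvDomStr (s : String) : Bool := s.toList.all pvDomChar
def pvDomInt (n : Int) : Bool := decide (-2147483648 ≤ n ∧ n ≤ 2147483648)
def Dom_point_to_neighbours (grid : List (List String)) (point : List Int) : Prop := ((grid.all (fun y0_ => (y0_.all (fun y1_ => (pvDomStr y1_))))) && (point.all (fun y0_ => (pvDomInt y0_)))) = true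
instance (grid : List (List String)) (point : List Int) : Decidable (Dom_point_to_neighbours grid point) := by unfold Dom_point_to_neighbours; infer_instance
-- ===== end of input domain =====

-- B uses a different algorithm: instead of enumerating the 8 offset candidates with
-- per-candidate bound checks, it scans every grid cell in row-major order and keeps
-- exactly those at Chebyshev distance 1 from the point (correct since the in-bounds
-- 8-neighbours are exactly those cells; row-major scan preserves A's output order).

-- ===== PORT A =====
def grid_to_width_height (grid : List (List String)) : Option (Int × Int) :=
  (PySem.List.pyGet? grid 0).map (fun row0 => (PySem.List.len row0, PySem.List.len grid))

def point_to_neighbours (grid : List (List String)) (point : List Int) : List (List Int) :=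
  match grid_to_width_height grid, PySem.List.pyGet? point 0, PySem.List.pyGet? point 1 with
  | some (grid_width, grid_height), some start_x, some start_y =>
    let max_x := grid_width - 1
    let max_y := grid_height - 1
    (PySem.List.pyRange (-1) 2 1).foldl (fun possible y =>
      (PySem.List.pyRange (-1) 2 1).foldl (fun possible x =>
        if x == 0 && y == 0 then possible
        else
          let new_x := start_x + x
          let new_y := start_y + y
          if new_x < 0 || new_x > max_x then possible
          else if new_y < 0 || new_y > max_y then possible
          else possible ++ [[new_x, new_y]]) possible) []
  | _, _, _ => []  -- unreachable under Pre_ (Python raises IndexError)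

-- ===== PORT B =====
def point_to_neighbours_alt (grid : List (List String)) (point : List Int) : List (List Int) :=
  match PySem.List.pyGet? point 0 with
  | none => []  -- unreachable under Pre_ (Python raises IndexError)
  | some x =>
  match PySem.List.pyGet? point 1 with
  | none => []
  | some y =>
  match PySem.List.pyGet? grid 0 with
  | none => []
  | some row0 =>
    let width := PySem.List.len row0
    (PySem.List.pyRange 0 (PySem.List.len grid) 1).foldl (fun acc yy =>
      (PySem.List.pyRange 0 width 1).foldl (fun acc xx =>
        if max |xx - x| |yy - y| == 1 then acc ++ [[xx, yy]] else acc) acc) []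

-- ===== PRECONDITION & SPEC =====
-- A (and B) raise IndexError on an empty grid (grid[0]) or a point with fewer than 2 entries.
def Pre_point_to_neighbours (grid : List (List String)) (point : List Int) : Prop :=
  grid ≠ [] ∧ 2 ≤ point.length
instance (grid : List (List String)) (point : List Int) : Decidable (Pre_point_to_neighbours grid point) := by unfold Pre_point_to_neighbours; infer_instance

def pvWitness_point_to_neighbours : List (List String) × List Int := ([["a", "b"], ["c", "d"]], [0, 1])

def Spec_point_to_neighbours (grid : List (List String)) (point : List Int) (out : List (List Int)) : Prop := out = point_to_neighbours_alt grid point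
instance (grid : List (List String)) (point : List Int) (out : List (List Int)) : Decidable (Spec_point_to_neighbours grid point out) := by unfold Spec_point_to_neighbours; infer_instance

-- ===== CLAIM =====
def Claim_equal_point_to_neighbours : Prop := ∀ (grid : List (List String)) (point : List Int), Dom_point_to_neighbours grid point → Pre_point_to_neighbours grid point → Spec_point_to_neighbours grid point (point_to_neighbours grid point)

-- ===== LEMMAS AND PROOFS =====

-- the row emitted for the cell coordinate yy in the canonical form shared by both proofs
def pvRow (x w y yy : Int) : List (List Int) :=
  ((if yy == y then [x - 1, x + 1] else [x - 1, x, x + 1]).filter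
      (fun v => decide (0 ≤ v) && decide (v < w))).map (fun xx => [xx, yy])

lemma flatMap_congr_mem {α β : Type} (l : List α) (f g : α → List β)
    (h : ∀ a ∈ l, f a = g a) : l.flatMap f = l.flatMap g := by
  induction l with
  | nil => rfl
  | cons a l ih =>
    simp only [List.flatMap_cons, h a (List.mem_cons_self), ih (fun a ha => h a (List.mem_cons_of_mem _ ha))]

lemma flatMap_drop_empty {α β : Type} (l : List α) (q : α → Bool) (f : α → List β)
    (h : ∀ a ∈ l, q a = false → f a = []) : l.flatMap f = (l.filter q).flatMap f := by
  induction l with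
  | nil => rfl
  | cons a l ih =>
    have ih' := ih (fun a ha => h a (List.mem_cons_of_mem _ ha))
    simp only [List.filter_cons]
    cases hq : q a with
    | false => simp [List.flatMap_cons, h a List.mem_cons_self hq, ih']
    | true => simp [List.flatMap_cons, ih']

lemma flatMap_filter_if {α β : Type} (q : α → Bool) (F : α → List β) (xs : List α) :
    (xs.filter q).flatMap F = xs.flatMap (fun a => if q a then F a else []) := by
  induction xs with
  | nil => rfl
  | cons a l ih => simp only [List.filter_cons, List.flatMap_cons]; split <;> simp [ih]

-- a filtered [0,n) range equals the in-bounds filter of an explicit sorted candidate list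
lemma filter_pyRange_eq (n : Int) (p : Int → Bool) (cands : List Int)
    (hpair : cands.Pairwise (· < ·))
    (hmem : ∀ a, (0 ≤ a ∧ a < n ∧ p a = true) ↔ (a ∈ cands ∧ 0 ≤ a ∧ a < n)) :
    (PySem.List.pyRange 0 n 1).filter p
      = cands.filter (fun v => decide (0 ≤ v) && decide (v < n)) := by
  have hperm : ((PySem.List.pyRange 0 n 1).filter p).Perm
      (cands.filter (fun v => decide (0 ≤ v) && decide (v < n))) := by
    rw [List.perm_ext_iff_of_nodup ((PySem.List.nodup_pyRange_one _ _).filter _)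
      ((hpair.filter _).nodup)]
    intro a
    simp only [List.mem_filter, PySem.List.mem_pyRange_one, Bool.and_eq_true, decide_eq_true_eq]
    constructor
    · rintro ⟨⟨h0, h1⟩, hp⟩
      obtain ⟨hc, _, _⟩ := (hmem a).mp ⟨h0, h1, hp⟩
      exact ⟨hc, h0, h1⟩
    · rintro ⟨hc, h0, h1⟩
      obtain ⟨_, _, hp⟩ := (hmem a).mpr ⟨hc, h0, h1⟩
      exact ⟨⟨h0, h1⟩, hp⟩
  exact List.Perm.eq_of_pairwise (fun a b _ _ h1 h2 => by omega)
    ((PySem.List.pairwise_lt_pyRange_one _ _).filter _) (hpair.filter _) hperm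

lemma pair3 (a : Int) : ([a - 1, a, a + 1]).Pairwise (· < ·) := by
  refine List.Pairwise.cons ?_ (List.Pairwise.cons ?_ (List.pairwise_singleton _ _)) <;>
    (intro v hv; simp at hv) <;> omega

-- B's filtered x-range for a row at vertical distance 0 or 1 is the candidate filter
lemma rowB_eq (x y w yy : Int) (hdy : yy = y - 1 ∨ yy = y ∨ yy = y + 1) :
    ((PySem.List.pyRange 0 w 1).filter (fun xx => max |xx - x| |yy - y| == 1)).map
        (fun xx => [xx, yy]) = pvRow x w y yy := by
  unfold pvRow
  rcases hdy with rfl | rfl | rfl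
  · rw [filter_pyRange_eq w _ [x - 1, x, x + 1] (pair3 x)
      (fun a => by
        simp only [beq_iff_eq, Int.abs_eq_natAbs, List.mem_cons, List.not_mem_nil, or_false]
        omega),
      if_neg (by simp only [beq_iff_eq]; omega)]
  · rw [filter_pyRange_eq w _ [x - 1, x + 1]
      (by refine List.Pairwise.cons ?_ (List.pairwise_singleton _ _)
          intro v hv; simp at hv; omega)
      (fun a => by
        simp only [beq_iff_eq, Int.abs_eq_natAbs, List.mem_cons, List.not_mem_nil, or_false]
        omega),
      if_pos (by simp)]
  · rw [filter_pyRange_eq w _ [x - 1, x, x + 1] (pair3 x)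
      (fun a => by
        simp only [beq_iff_eq, Int.abs_eq_natAbs, List.mem_cons, List.not_mem_nil, or_false]
        omega),
      if_neg (by simp only [beq_iff_eq]; omega)]

-- rows at vertical distance ≥ 2 contribute nothing
lemma rowB_far (x y w yy : Int) (hfar : ¬ (|yy - y| ≤ 1)) :
    ((PySem.List.pyRange 0 w 1).filter (fun xx => max |xx - x| |yy - y| == 1)).map
        (fun xx => [xx, yy]) = [] := by
  rw [List.filter_eq_nil_iff.mpr]
  · rfl
  · intro a _
    simp only [beq_iff_eq, Int.abs_eq_natAbs] at *
    omega

-- canonical form: both programs produce the concatenation of the in-bounds rows y-1, y, y+1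
def pvCanon (x y w h : Int) : List (List Int) :=
  ([y - 1, y, y + 1].filter (fun v => decide (0 ≤ v) && decide (v < h))).flatMap (pvRow x w y)

lemma B_eq_canon (x y w h : Int) :
    (PySem.List.pyRange 0 h 1).foldl (fun acc yy =>
      (PySem.List.pyRange 0 w 1).foldl (fun acc xx =>
        if max |xx - x| |yy - y| == 1 then acc ++ [[xx, yy]] else acc) acc) []
    = pvCanon x y w h := by
  have L1 : ∀ (yy : Int) (acc : List (List Int)),
      (PySem.List.pyRange 0 w 1).foldl (fun acc xx =>
        if max |xx - x| |yy - y| == 1 then acc ++ [[xx, yy]] else acc) acc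
      = acc ++ ((PySem.List.pyRange 0 w 1).filter
          (fun xx => max |xx - x| |yy - y| == 1)).map (fun xx => [xx, yy]) := by
    intro yy acc
    rw [PySem.List.foldl_append_if]
  simp only [L1]
  rw [PySem.List.foldl_append_eq_flatMap, List.nil_append]
  rw [flatMap_drop_empty (PySem.List.pyRange 0 h 1) (fun yy => decide (|yy - y| ≤ 1)) _
    (by intro yy _ hq; simp only [decide_eq_false_iff_not] at hq; exact rowB_far x y w yy hq)]
  rw [filter_pyRange_eq h _ [y - 1, y, y + 1] (pair3 y)
    (by intro a;
        simp only [decide_eq_true_eq, Int.abs_eq_natAbs, List.mem_cons, List.not_mem_nil, or_false];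
        omega)]
  unfold pvCanon
  apply flatMap_congr_mem
  intro yy hyy
  have hmem : yy = y - 1 ∨ yy = y ∨ yy = y + 1 := by
    have := List.mem_of_mem_filter hyy
    simpa using this
  exact rowB_eq x y w yy hmem

-- helper facts for A's candidate scan
lemma negb_bound (a b : Int) :
    (decide (a < 0) || decide (a > b - 1)) = !(decide (0 ≤ a) && decide (a < b)) := by
  by_cases h1 : a < 0 <;> by_cases h2 : a > b - 1 <;> simp [h1, h2] <;> omega

-- one of A's offset rows (at vertical offset dy) is the canonical row at yy = y + dy
lemma rowA_eq (x y w h dy yy : Int) (hdy : dy = -1 ∨ dy = 0 ∨ dy = 1) (hyy : yy = y + dy) :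
    (([(-1 : Int), 0, 1].filter (fun dx =>
        !(dx == 0 && dy == 0) && !(decide (x + dx < 0) || decide (x + dx > w - 1))
          && !(decide (y + dy < 0) || decide (y + dy > h - 1)))).map (fun dx => [x + dx, y + dy]))
      = if (decide (0 ≤ yy) && decide (yy < h)) = true then pvRow x w y yy else [] := by
  subst hyy
  unfold pvRow
  rcases hdy with rfl | rfl | rfl
  · simp only [List.filter_cons, List.filter_nil, negb_bound, Bool.not_not,
      show ((-1 : Int) == 0) = false from by decide,
      show x + (-1) = x - 1 from by ring, show x + (0 : Int) = x from by ring,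
      show y + (-1) = y - 1 from by ring,
      show ((y - 1 : Int) == y) = false from by rw [beq_eq_false_iff_ne]; omega,
      Bool.and_false, Bool.not_false, Bool.true_and, Bool.false_eq_true, if_false]
    cases hy : (decide (0 ≤ y - 1) && decide (y - 1 < h)) <;>
      cases h1 : (decide (0 ≤ x - 1) && decide (x - 1 < w)) <;>
      cases h2 : (decide (0 ≤ x) && decide (x < w)) <;>
      cases h3 : (decide (0 ≤ x + 1) && decide (x + 1 < w)) <;>
      simp [hy, h1, h2, h3] <;> omega
  · simp only [List.filter_cons, List.filter_nil, negb_bound, Bool.not_not,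
      show ((-1 : Int) == 0) = false from by decide, show ((0 : Int) == 0) = true from by decide,
      show ((1 : Int) == 0) = false from by decide,
      show x + (-1) = x - 1 from by ring, show x + (0 : Int) = x from by ring,
      show y + (0 : Int) = y from by ring,
      show ((y : Int) == y) = true from by simp,
      Bool.false_and, Bool.and_true, Bool.true_and,
      Bool.not_false, Bool.not_true, if_pos]
    cases hy : (decide (0 ≤ y) && decide (y < h)) <;>
      cases h1 : (decide (0 ≤ x - 1) && decide (x - 1 < w)) <;>
      cases h3 : (decide (0 ≤ x + 1) && decide (x + 1 < w)) <;>
      simp [hy, h1, h3] <;> omega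
  · simp only [List.filter_cons, List.filter_nil, negb_bound, Bool.not_not,
      show ((1 : Int) == 0) = false from by decide,
      show x + (-1) = x - 1 from by ring, show x + (0 : Int) = x from by ring,
      show ((y + 1 : Int) == y) = false from by rw [beq_eq_false_iff_ne]; omega,
      Bool.and_false, Bool.not_false, Bool.true_and, Bool.false_eq_true, if_false]
    cases hy : (decide (0 ≤ y + 1) && decide (y + 1 < h)) <;>
      cases h1 : (decide (0 ≤ x - 1) && decide (x - 1 < w)) <;>
      cases h2 : (decide (0 ≤ x) && decide (x < w)) <;>
      cases h3 : (decide (0 ≤ x + 1) && decide (x + 1 < w)) <;>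
      simp [hy, h1, h2, h3] <;> omega

lemma A_eq_canon (x y w h : Int) :
    ([(-1 : Int), 0, 1]).foldl (fun possible dy =>
      ([(-1 : Int), 0, 1]).foldl (fun possible dx =>
        if dx == 0 && dy == 0 then possible
        else
          if x + dx < 0 || x + dx > w - 1 then possible
          else if y + dy < 0 || y + dy > h - 1 then possible
          else possible ++ [[x + dx, y + dy]]) possible) []
    = pvCanon x y w h := by
  have L2 : ∀ (dy : Int) (acc : List (List Int)),
      ([(-1 : Int), 0, 1]).foldl (fun possible dx =>
        if dx == 0 && dy == 0 then possible
        else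
          if x + dx < 0 || x + dx > w - 1 then possible
          else if y + dy < 0 || y + dy > h - 1 then possible
          else possible ++ [[x + dx, y + dy]]) acc
        = acc ++ (([(-1 : Int), 0, 1]).filter (fun dx =>
            !(dx == 0 && dy == 0) && !(decide (x + dx < 0) || decide (x + dx > w - 1))
              && !(decide (y + dy < 0) || decide (y + dy > h - 1)))).map (fun dx => [x + dx, y + dy]) := by
    intro dy acc
    have hf : (fun (possible : List (List Int)) (dx : Int) =>
          if dx == 0 && dy == 0 then possible
          else
            if x + dx < 0 || x + dx > w - 1 then possible
            else if y + dy < 0 || y + dy > h - 1 then possible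
            else possible ++ [[x + dx, y + dy]])
        = (fun possible dx =>
            if (!(dx == 0 && dy == 0) && !(decide (x + dx < 0) || decide (x + dx > w - 1))
                && !(decide (y + dy < 0) || decide (y + dy > h - 1))) = true
            then possible ++ [[x + dx, y + dy]] else possible) := by
      funext acc' dx
      cases h1 : (dx == 0 && dy == 0) <;>
        cases h2 : (decide (x + dx < 0) || decide (x + dx > w - 1)) <;>
        cases h3 : (decide (y + dy < 0) || decide (y + dy > h - 1)) <;>
        simp [h1, h2, h3]
    rw [hf, PySem.List.foldl_append_if]
  simp only [L2]
  rw [PySem.List.foldl_append_eq_flatMap, List.nil_append]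
  unfold pvCanon
  rw [flatMap_filter_if]
  simp only [List.flatMap_cons, List.flatMap_nil, List.append_nil]
  rw [rowA_eq x y w h (-1) (y - 1) (by tauto) (by ring),
      rowA_eq x y w h 0 y (by tauto) (by ring),
      rowA_eq x y w h 1 (y + 1) (by tauto) (by ring)]

-- ===== VERDICT =====
theorem point_to_neighbours_spec : Claim_equal_point_to_neighbours := by
  intro grid point _ hpre
  obtain ⟨hg, hp⟩ := hpre
  rcases grid with _ | ⟨g0, gr⟩
  · exact absurd rfl hg
  rcases point with _ | ⟨p0, pr⟩
  · simp at hp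
  rcases pr with _ | ⟨p1, pr⟩
  · simp at hp
  have h0 : PySem.List.pyGet? (g0 :: gr) 0 = some g0 := PySem.List.pyGet?_zero_cons g0 gr
  have hp0 : PySem.List.pyGet? (p0 :: p1 :: pr) 0 = some p0 := PySem.List.pyGet?_zero_cons p0 _
  have hp1 : PySem.List.pyGet? (p0 :: p1 :: pr) 1 = some p1 := by
    rw [show (1 : Int) = ((1 : Nat) : Int) from by norm_num, PySem.List.pyGet?_natCast]; rfl
  show point_to_neighbours _ _ = point_to_neighbours_alt _ _
  rw [point_to_neighbours, point_to_neighbours_alt, grid_to_width_height, h0, hp0, hp1]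
  simp only [Option.map_some]
  rw [show PySem.List.pyRange (-1) 2 1 = [-1, 0, 1] from by decide]
  rw [A_eq_canon p0 p1 (PySem.List.len g0) (PySem.List.len (g0 :: gr)),
      B_eq_canon p0 p1 (PySem.List.len g0) (PySem.List.len (g0 :: gr))]
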